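-- pv_equiv track=rewrite | github.com/questionmarksoap/palabras | irregapi3.py | make_tu_orders
-- ===== SOURCE A (Python) =====
-- a2 = ['tocar', 'ubicar', 'verificar', 'acercarse', 'aplicar', 'atacar', 'buscar', 'colocar', 'comunicar', 'dedicar', 'enfocar', 'explicar', 'fabricar', 'identificar', 'indicar', 'practicar', 'publicar', 'sacar', 'significar', 'simplificar']
--
-- a3 = ['apagar', 'entregar', 'llegar', 'arriesgar', 'descargar', 'investigar', 'obligar', 'pagar']
--
-- a10 = ['acostarse', 'contar', 'demostrar', 'mostrar', 'acordar', 'comprobar', 'costar', 'encontrar', 'probar', 'recordar', 'soltar', 'soñar', 'volar']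
--
-- a11 = ['almorzar', 'forzar']
--
-- e3 = ['agradecer', 'conocer', 'crecer', 'desaparecer', 'nacer', 'aparecer', 'establecer', 'ofrecer', 'parecer', 'permanecer', 'reconocer']
--
-- i11 = ['sentir', 'sentirse', 'sugerir', 'convertir', 'herir', 'mentir', 'preferir','referir']
--
-- a4 = ['abrazar', 'alcanzar', 'aterrizar', 'avanzar', 'cruzar', 'lanzar', 'realizar', 'rechazar', 'utilizar']
--
-- def make_tu_orders(verb):
--
--     if  verb in a2:
--         if verb.endswith("arse"):
--             stem_changes = {'acer': 'acér'}
--             for orig, change in stem_changes.items():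
--                 if orig in verb:
--                     irr_form = verb.replace(orig, change)
--                     return f"{irr_form[:-4]}ate"
--         else:
--             return verb[:-2] + "a"
--     elif verb in a3:
--         return verb[:-2] + "a" if verb.endswith("ar") else verb[:-4] + "ate"
--     elif verb in a11:
--         stem_changes = {'orz': 'uerz'}
--         for orig, change in stem_changes.items():
--             if orig in verb:
--                 irr_form = verb.replace(orig, change)
--                 return f"{irr_form[:-4]}ate" if verb.endswith("se") else f"{irr_form[:-2]}a"
--     elif verb in e3:
--         return verb[:-2] + "e" if verb.endswith("er") else verb[:-4] + "ete"
--     elif verb in a10: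
--         if verb.endswith("arse"):
--             stem_changes = {'con': 'cuen', 'cos': 'cués', 'mos': 'mues', 'cor': 'cuer', 'ro': 'rue', 'vo': 'vue', 'so': 'sue'}
--         else:
--             stem_changes = {'con': 'cuen', 'cos': 'cues', 'mos': 'mues', 'cor': 'cuer', 'ro': 'rue', 'vo': 'vue', 'so': 'sue'}
--         for orig, change in stem_changes.items():
--             if orig in verb:
--                 irr_form = verb.replace(orig, change)
--                 return f"{irr_form[:-4]}ate" if verb.endswith("se") else f"{irr_form[:-2]}a"
--     elif verb in i11:
--         if verb.endswith("se"):
--             stem_changes = {'en': 'ién', 'er': 'iér'}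
--             for orig, change in stem_changes.items():
--                 if orig in verb:
--                     irr_form = verb.replace(orig, change)
--                     return f"{irr_form[:-4]}ete" if verb.endswith("se") else f"{irr_form[:-2]}e"
--         elif verb.endswith('ir'):
--             stem_changes = {'en': 'ien', 'er': 'ier'}
--             for orig, change in stem_changes.items():
--                 if orig in verb:
--                     irr_form = verb.replace(orig, change)
--                     return f"{irr_form[:-4]}ete" if verb.endswith("se") else f"{irr_form[:-2]}e"
--     elif verb in a4:
--         return verb[:-2] + "a"
--     else:
--         return ""
--     return irr_form
-- ===== SOURCE B (Python) =====
-- # B: binary search over a sorted verb list with a parallel command list,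
-- # replacing A's seven-way branch with per-branch stem-change loops and string surgery.
-- _KEYS = [
--     'abrazar',
--     'acercarse',
--     'acordar',
--     'acostarse',
--     'agradecer',
--     'alcanzar',
--     'almorzar',
--     'apagar',
--     'aparecer',
--     'aplicar',
--     'arriesgar',
--     'atacar',
--     'aterrizar',
--     'avanzar',
--     'buscar',
--     'colocar',
--     'comprobar',
--     'comunicar',
--     'conocer',
--     'contar',
--     'convertir',
--     'costar',
--     'crecer',
--     'cruzar',
--     'dedicar',
--     'demostrar',
--     'desaparecer',
--     'descargar',
--     'encontrar',
--     'enfocar',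
--     'entregar',
--     'establecer',
--     'explicar',
--     'fabricar',
--     'forzar',
--     'herir',
--     'identificar',
--     'indicar',
--     'investigar',
--     'lanzar',
--     'llegar',
--     'mentir',
--     'mostrar',
--     'nacer',
--     'obligar',
--     'ofrecer',
--     'pagar',
--     'parecer',
--     'permanecer',
--     'practicar',
--     'preferir',
--     'probar',
--     'publicar',
--     'realizar',
--     'rechazar',
--     'reconocer',
--     'recordar',
--     'referir',
--     'sacar',
--     'sentir',
--     'sentirse',
--     'significar',
--     'simplificar',
--     'soltar',
--     'soñar',
--     'sugerir',
--     'tocar',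
--     'ubicar',
--     'utilizar',
--     'verificar',
--     'volar',
-- ]
--
-- _VALS = [
--     'abraza',
--     'acércate',
--     'acuerda',
--     'acuéstate',
--     'agradece',
--     'alcanza',
--     'almuerza',
--     'apaga',
--     'aparece',
--     'aplica',
--     'arriesga',
--     'ataca',
--     'aterriza',
--     'avanza',
--     'busca',
--     'coloca',
--     'comprueba',
--     'comunica',
--     'conoce',
--     'cuenta',
--     'convierte',
--     'cuesta',
--     'crece',
--     'cruza',
--     'dedica',
--     'demuestra',
--     'desaparece',
--     'descarga',
--     'encuentra',
--     'enfoca',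
--     'entrega',
--     'establece',
--     'explica',
--     'fabrica',
--     'fuerza',
--     'hiere',
--     'identifica',
--     'indica',
--     'investiga',
--     'lanza',
--     'llega',
--     'miente',
--     'muestra',
--     'nace',
--     'obliga',
--     'ofrece',
--     'paga',
--     'parece',
--     'permanece',
--     'practica',
--     'prefiere',
--     'prueba',
--     'publica',
--     'realiza',
--     'rechaza',
--     'reconoce',
--     'recuerda',
--     'refiere',
--     'saca',
--     'siente',
--     'siéntete',
--     'significa',
--     'simplifica',
--     'suelta',
--     'sueña',
--     'sugiere',
--     'toca',
--     'ubica',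
--     'utiliza',
--     'verifica',
--     'vuela',
-- ]
--
--
-- def make_tu_orders(verb):
--     lo, hi = 0, len(_KEYS)
--     while lo < hi:
--         mid = (lo + hi) // 2
--         if _KEYS[mid] < verb:
--             lo = mid + 1
--         else:
--             hi = mid
--     if lo < len(_KEYS) and _KEYS[lo] == verb:
--         return _VALS[lo]
--     return ""
-- ===== Notes on version B (the rewrite author's own statement) =====
-- stated objective: alternative
-- what changed: Replaces A's seven-way branch with per-branch stem-change loops and string surgery by one sorted verb list with a parallel command list and a hand-written binary search lookup defaulting to the empty string.
import Mathlib
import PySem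

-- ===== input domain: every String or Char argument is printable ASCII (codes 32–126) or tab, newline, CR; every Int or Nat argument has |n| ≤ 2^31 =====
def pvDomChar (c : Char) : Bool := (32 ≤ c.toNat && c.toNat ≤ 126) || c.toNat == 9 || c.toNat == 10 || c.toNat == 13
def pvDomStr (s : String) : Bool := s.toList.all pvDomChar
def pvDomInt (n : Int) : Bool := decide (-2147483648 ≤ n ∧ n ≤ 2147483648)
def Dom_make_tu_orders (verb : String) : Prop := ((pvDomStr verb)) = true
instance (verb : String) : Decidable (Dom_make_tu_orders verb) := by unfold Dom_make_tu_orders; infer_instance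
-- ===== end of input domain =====

-- B replaces A's nested branch-and-string-surgery by binary search in one sorted
-- verb-to-command table (objective: alternative).

-- ===== PORT A =====
def pvA2 : List String := ["tocar", "ubicar", "verificar", "acercarse", "aplicar", "atacar", "buscar", "colocar", "comunicar", "dedicar", "enfocar", "explicar", "fabricar", "identificar", "indicar", "practicar", "publicar", "sacar", "significar", "simplificar"]
def pvA3 : List String := ["apagar", "entregar", "llegar", "arriesgar", "descargar", "investigar", "obligar", "pagar"]
def pvA10 : List String := ["acostarse", "contar", "demostrar", "mostrar", "acordar", "comprobar", "costar", "encontrar", "probar", "recordar", "soltar", "soñar", "volar"]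
def pvA11 : List String := ["almorzar", "forzar"]
def pvE3 : List String := ["agradecer", "conocer", "crecer", "desaparecer", "nacer", "aparecer", "establecer", "ofrecer", "parecer", "permanecer", "reconocer"]
def pvI11 : List String := ["sentir", "sentirse", "sugerir", "convertir", "herir", "mentir", "preferir", "referir"]
def pvA4 : List String := ["abrazar", "alcanzar", "aterrizar", "avanzar", "cruzar", "lanzar", "realizar", "rechazar", "utilizar"]

-- Python "for orig, change in stem_changes.items(): if orig in verb: return fmt(verb.replace(orig, change))"
-- (returns on the FIRST matching key; none = the loop fell through)
def pvLoop (fmt : String → String) (verb : String) : List (String × String) → Option String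
  | [] => none
  | (orig, change) :: rest =>
      if PySem.Str.isIn orig verb then some (fmt (PySem.Str.replace verb orig change))
      else pvLoop fmt verb rest

def make_tu_orders (verb : String) : String :=
  if verb ∈ pvA2 then
    if PySem.Str.endswith verb "arse" then
      -- a fall-through here would hit `return irr_form` with irr_form unbound (UnboundLocalError);
      -- it is unreachable for the fixed lists, modeled as ""
      (pvLoop (fun irr => PySem.Str.slice irr none (some (-4)) ++ "ate") verb [("acer", "acér")]).getD ""
    else PySem.Str.slice verb none (some (-2)) ++ "a"
  else if verb ∈ pvA3 then
    if PySem.Str.endswith verb "ar" then PySem.Str.slice verb none (some (-2)) ++ "a"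
    else PySem.Str.slice verb none (some (-4)) ++ "ate"
  else if verb ∈ pvA11 then
    (pvLoop (fun irr => if PySem.Str.endswith verb "se" then PySem.Str.slice irr none (some (-4)) ++ "ate"
                        else PySem.Str.slice irr none (some (-2)) ++ "a")
       verb [("orz", "uerz")]).getD ""
  else if verb ∈ pvE3 then
    if PySem.Str.endswith verb "er" then PySem.Str.slice verb none (some (-2)) ++ "e"
    else PySem.Str.slice verb none (some (-4)) ++ "ete"
  else if verb ∈ pvA10 then
    (pvLoop (fun irr => if PySem.Str.endswith verb "se" then PySem.Str.slice irr none (some (-4)) ++ "ate"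
                        else PySem.Str.slice irr none (some (-2)) ++ "a")
       verb
       (if PySem.Str.endswith verb "arse" then
          [("con", "cuen"), ("cos", "cués"), ("mos", "mues"), ("cor", "cuer"), ("ro", "rue"), ("vo", "vue"), ("so", "sue")]
        else
          [("con", "cuen"), ("cos", "cues"), ("mos", "mues"), ("cor", "cuer"), ("ro", "rue"), ("vo", "vue"), ("so", "sue")])).getD ""
  else if verb ∈ pvI11 then
    if PySem.Str.endswith verb "se" then
      (pvLoop (fun irr => if PySem.Str.endswith verb "se" then PySem.Str.slice irr none (some (-4)) ++ "ete"
                          else PySem.Str.slice irr none (some (-2)) ++ "e")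
         verb [("en", "ién"), ("er", "iér")]).getD ""
    else if PySem.Str.endswith verb "ir" then
      (pvLoop (fun irr => if PySem.Str.endswith verb "se" then PySem.Str.slice irr none (some (-4)) ++ "ete"
                          else PySem.Str.slice irr none (some (-2)) ++ "e")
         verb [("en", "ien"), ("er", "ier")]).getD ""
    else "" -- fall-through `return irr_form` (UnboundLocalError); unreachable for the fixed list
  else if verb ∈ pvA4 then
    PySem.Str.slice verb none (some (-2)) ++ "a"
  else ""

-- ===== PORT B =====
-- _KEYS: the irregular verbs, sorted; _VALS: the parallel tú-command list
def pvBKeys : List String := ["abrazar", "acercarse", "acordar", "acostarse", "agradecer", "alcanzar", "almorzar", "apagar", "aparecer", "aplicar", "arriesgar", "atacar", "aterrizar", "avanzar", "buscar", "colocar", "comprobar", "comunicar", "conocer", "contar", "convertir", "costar", "crecer", "cruzar", "dedicar", "demostrar", "desaparecer", "descargar", "encontrar", "enfocar", "entregar", "establecer", "explicar", "fabricar", "forzar", "herir", "identificar", "indicar", "investigar", "lanzar", "llegar", "mentir", "mostrar", "nacer", "obligar", "ofrecer", "pagar", "parecer", "permanecer", "practicar", "preferir", "probar", "publicar", "realizar",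 "rechazar", "reconocer", "recordar", "referir", "sacar", "sentir", "sentirse", "significar", "simplificar", "soltar", "soñar", "sugerir", "tocar", "ubicar", "utilizar", "verificar", "volar"]

def pvBVals : List String := ["abraza", "acércate", "acuerda", "acuéstate", "agradece", "alcanza", "almuerza", "apaga", "aparece", "aplica", "arriesga", "ataca", "aterriza", "avanza", "busca", "coloca", "comprueba", "comunica", "conoce", "cuenta", "convierte", "cuesta", "crece", "cruza", "dedica", "demuestra", "desaparece", "descarga", "encuentra", "enfoca", "entrega", "establece", "explica", "fabrica", "fuerza", "hiere", "identifica", "indica", "investiga", "lanza", "llega", "miente", "muestra", "nace", "obliga", "ofrece", "paga", "parece", "permanece", "practica", "prefiere", "prueba", "publica", "realiza", "rechaza", "reconoce", "recuerda", "refiere", "saca", "siente", "siéntete", "significa", "simplifica", "suelta", "sueña", "sugiere", "toca", "ubica", "utiliza", "verifica", "vuela"]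

-- the `while lo < hi` bisection loop of Source B; fuel (length + 1 at the call site) only
-- makes the recursion structural — it exceeds the loop's iteration count
def pvBisect (verb : String) : Nat → Nat → Nat → Nat
  | 0, lo, _ => lo
  | fuel + 1, lo, hi =>
      if lo < hi then
        -- mid = (lo + hi) // 2;  _KEYS[mid] (mid is in range, so pyGet? is `some`);
        -- `_KEYS[mid] < verb` is PySem.Chars.strLt, Python's `<` on str
        match PySem.List.pyGet? pvBKeys (((lo + hi) / 2 : Nat) : Int) with
        | some k =>
            if PySem.Chars.strLt k.toList verb.toList then pvBisect verb fuel ((lo + hi) / 2 + 1) hi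
            else pvBisect verb fuel lo ((lo + hi) / 2)
        | none => lo
      else lo

-- `if lo < len(_KEYS) and _KEYS[lo] == verb: return _VALS[lo]; return ""`
-- (lo ≥ 0, so pyGet? = some ↔ lo < len(_KEYS); _VALS has the same length, so its
--  pyGet? is `some` whenever the guard held — getD "" is never taken)
def make_tu_orders_alt (verb : String) : String :=
  match PySem.List.pyGet? pvBKeys ((pvBisect verb (pvBKeys.length + 1) 0 pvBKeys.length : Nat) : Int) with
  | some k => if k == verb then (PySem.List.pyGet? pvBVals ((pvBisect verb (pvBKeys.length + 1) 0 pvBKeys.length : Nat) : Int)).getD "" else ""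
  | none => ""

-- ===== PRECONDITION & SPEC =====
def Spec_make_tu_orders (verb : String) (out : String) : Prop := out = make_tu_orders_alt verb
instance (verb : String) (out : String) : Decidable (Spec_make_tu_orders verb out) := by unfold Spec_make_tu_orders; infer_instance

-- ===== CLAIM =====
def Claim_equal_make_tu_orders : Prop := ∀ (verb : String), Dom_make_tu_orders verb → Spec_make_tu_orders verb (make_tu_orders verb)

-- ===== LEMMAS AND PROOFS =====
def pvKeys : List String := pvA2 ++ pvA3 ++ pvA11 ++ pvE3 ++ pvA10 ++ pvI11 ++ pvA4

theorem pv_eq_of_mem (verb : String) (h : verb ∈ pvKeys) :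
    make_tu_orders verb = make_tu_orders_alt verb := by
  fin_cases h <;> decide

theorem pv_table_keys : ∀ k ∈ pvBKeys, k ∈ pvKeys := by decide

theorem pv_alt_empty (verb : String) (h : verb ∉ pvKeys) : make_tu_orders_alt verb = "" := by
  unfold make_tu_orders_alt
  cases hg : PySem.List.pyGet? pvBKeys ((pvBisect verb (pvBKeys.length + 1) 0 pvBKeys.length : Nat) : Int) with
  | none => rfl
  | some k =>
      have hk : k ∈ pvKeys := pv_table_keys k (PySem.List.mem_of_pyGet?_eq_some pvBKeys hg)
      have hne : (k == verb) = false := by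
        simp only [beq_eq_false_iff_ne, ne_eq]
        exact fun e => h (e ▸ hk)
      simp [hne]

theorem pv_eq_of_not_mem (verb : String) (h : verb ∉ pvKeys) :
    make_tu_orders verb = make_tu_orders_alt verb := by
  have h2 : verb ∉ pvA2 := fun hm => h (by simp [pvKeys, hm])
  have h3 : verb ∉ pvA3 := fun hm => h (by simp [pvKeys, hm])
  have h11 : verb ∉ pvA11 := fun hm => h (by simp [pvKeys, hm])
  have he : verb ∉ pvE3 := fun hm => h (by simp [pvKeys, hm])
  have h10 : verb ∉ pvA10 := fun hm => h (by simp [pvKeys, hm])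
  have hi : verb ∉ pvI11 := fun hm => h (by simp [pvKeys, hm])
  have h4 : verb ∉ pvA4 := fun hm => h (by simp [pvKeys, hm])
  rw [pv_alt_empty verb h]
  simp [make_tu_orders, h2, h3, h11, he, h10, hi, h4]

-- ===== VERDICT =====
theorem make_tu_orders_spec : Claim_equal_make_tu_orders := by
  intro verb _
  unfold Spec_make_tu_orders
  by_cases h : verb ∈ pvKeys
  · exact pv_eq_of_mem verb h
  · exact pv_eq_of_not_mem verb h
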